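-- pv_equiv track=rewrite | github.com/gapolinario/aoc | 2023/code/day09.py | list_to_coeffs
-- ===== SOURCE A (Python) =====
-- from math import comb
--
-- def list_to_coeffs(list):
--
--     coeffs = [0] * len(list)
--
--     for i,a in enumerate(list):
--         a = list[i]
--         for j in range(i):
--             a -= comb(i,j) * coeffs[j]
--         coeffs[i] = a
--
--     return coeffs
-- ===== SOURCE B (Python) =====
-- def list_to_coeffs(list):
--     # Iterated finite-difference table: coeffs[i] is the i-th forward
--     # difference of the list at 0 (only subtractions, no binomials).
--     coeffs = []
--     row = list
--     while row:
--         coeffs.append(row[0])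
--         row = [b - a for a, b in zip(row, row[1:])]
--     return coeffs
-- ===== Notes on version B (the rewrite author's own statement) =====
-- stated objective: faster
-- what changed: Replaces the triangular solve that subtracts comb(i,j)-weighted previous coefficients (recomputing a binomial for every pair) with the iterated finite-difference table, whose first column is exactly the coefficient list, using only subtractions.
import Mathlib
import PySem

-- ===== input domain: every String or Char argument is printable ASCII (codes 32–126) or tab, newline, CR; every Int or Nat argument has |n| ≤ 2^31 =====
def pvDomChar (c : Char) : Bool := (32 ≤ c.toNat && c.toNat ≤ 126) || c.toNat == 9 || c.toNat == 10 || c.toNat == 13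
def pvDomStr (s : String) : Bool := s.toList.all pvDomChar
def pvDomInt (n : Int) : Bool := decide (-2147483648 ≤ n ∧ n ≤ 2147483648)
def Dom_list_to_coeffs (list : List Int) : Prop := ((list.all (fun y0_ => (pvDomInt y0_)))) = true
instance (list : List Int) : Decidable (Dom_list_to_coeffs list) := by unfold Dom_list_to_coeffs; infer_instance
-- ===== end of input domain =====

-- B replaces A's triangular solve with comb(i,j) weights by the iterated
-- finite-difference table (subtractions only): faster, same exact values.

-- ===== PORT A =====
-- literal transliteration of A: coeffs = [0]*len(list); for i,a in enumerate(list):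
--   a = list[i]; for j in range(i): a -= comb(i,j)*coeffs[j]; coeffs[i] = a
-- indices i and j are always in range, so pyGetD/pySetD never hit their default;
-- comb(i,j) with i,j ≥ 0 is exactly Nat.choose i.toNat j.toNat
def list_to_coeffs (list : List Int) : List Int :=
  let coeffs : List Int := List.replicate list.length 0
  (PySem.List.enumerate list).foldl (fun coeffs p =>
    let i := p.1
    let a := PySem.List.pyGetD list i 0      -- a = list[i] (rebinds the loop value)
    let a := (PySem.List.pyRange 0 i 1).foldl
      (fun a j => a - (Nat.choose i.toNat j.toNat : Int) * PySem.List.pyGetD coeffs j 0) a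
    PySem.List.pySetD coeffs i a) coeffs

-- ===== PORT B =====
-- row = [b - a for a, b in zip(row, row[1:])]  (row[1:] of a nonempty list is its tail)
def pvDiff (row : List Int) : List Int :=
  List.zipWith (fun a b => b - a) row row.tail

theorem pvDiff_length (row : List Int) : (pvDiff row).length = row.length - 1 := by
  simp [pvDiff]

-- the while loop: take row[0], replace row by its difference row, repeat until empty
def list_to_coeffs_alt (list : List Int) : List Int :=
  match list with
  | [] => []
  | x :: rest => x :: list_to_coeffs_alt (pvDiff (x :: rest))
termination_by list.length
decreasing_by simp [pvDiff_length]

-- ===== PRECONDITION & SPEC =====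
def Spec_list_to_coeffs (list : List Int) (out : List Int) : Prop := out = list_to_coeffs_alt list
instance (list : List Int) (out : List Int) : Decidable (Spec_list_to_coeffs list out) := by unfold Spec_list_to_coeffs; infer_instance

-- ===== CLAIM (what is proved, stated in full; the proofs are below) =====
def Claim_equal_list_to_coeffs : Prop := ∀ (list : List Int), Dom_list_to_coeffs list → Spec_list_to_coeffs list (list_to_coeffs list)

-- ===== LEMMAS AND PROOFS =====

theorem alt_cons (x : Int) (rest : List Int) :
    list_to_coeffs_alt (x :: rest) = x :: list_to_coeffs_alt (pvDiff (x :: rest)) := by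
  rw [list_to_coeffs_alt]

theorem alt_length (row : List Int) : (list_to_coeffs_alt row).length = row.length := by
  induction row using list_to_coeffs_alt.induct with
  | case1 => simp [list_to_coeffs_alt]
  | case2 x rest ih =>
    rw [alt_cons]
    simp only [List.length_cons, ih, pvDiff_length]
    simp

theorem pvDiff_getD (row : List Int) (i : Nat) (h : i + 1 < row.length) :
    (pvDiff row).getD i 0 = row.getD (i+1) 0 - row.getD i 0 := by
  have h1 : i < (pvDiff row).length := by rw [pvDiff_length]; omega
  have h2 : i < row.length := by omega
  have h3 : i < row.tail.length := by simp [List.length_tail]; omega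
  rw [List.getD_eq_getElem _ _ h1, List.getD_eq_getElem _ _ h2, List.getD_eq_getElem _ _ h]
  simp [pvDiff, List.getElem_tail]

theorem sum_map_add {α : Type} (l : List α) (f g : α → Int) :
    (l.map (fun x => f x + g x)).sum = (l.map f).sum + (l.map g).sum := by
  induction l with
  | nil => simp
  | cons x t ih => simp only [List.map_cons, List.sum_cons, ih]; ring

-- Pascal's rule recombination of list sums
theorem pascal_list (i : Nat) (c : Nat → Int) :
    ((List.range (i+2)).map (fun j => ((i+1).choose j : Int) * c j)).sum =
    ((List.range (i+1)).map (fun j => (i.choose j : Int) * c j)).sum +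
    ((List.range (i+1)).map (fun j => (i.choose j : Int) * c (j+1))).sum := by
  have h1 : ((List.range (i+2)).map (fun j => ((i+1).choose j : Int) * c j)).sum
      = c 0 + (((List.range (i+1)).map (fun j => (i.choose j : Int) * c (j+1))).sum
          + ((List.range i).map (fun j => (i.choose (j+1) : Int) * c (j+1))).sum) := by
    rw [show i + 2 = (i+1) + 1 from rfl, List.range_succ_eq_map]
    simp only [List.map_cons, List.sum_cons, List.map_map, Function.comp_def,
      Nat.succ_eq_add_one, Nat.choose_zero_right, Nat.cast_one, one_mul]
    congr 1
    have hcc : ((List.range (i+1)).map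
          (fun j => ((i+1).choose (j+1) : Int) * c (j+1))).sum
        = ((List.range (i+1)).map
          (fun j => (i.choose j : Int) * c (j+1) + (i.choose (j+1) : Int) * c (j+1))).sum := by
      congr 1
      refine List.map_congr_left (fun j _ => ?_)
      rw [Nat.choose_succ_succ]
      push_cast
      ring
    rw [hcc, sum_map_add]
    congr 1
    rw [List.range_succ]
    simp [Nat.choose_succ_self]
  have h2 : ((List.range (i+1)).map (fun j => (i.choose j : Int) * c j)).sum
      = c 0 + ((List.range i).map (fun j => (i.choose (j+1) : Int) * c (j+1))).sum := by
    rw [List.range_succ_eq_map]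
    simp only [List.map_cons, List.sum_cons, List.map_map, Function.comp_def,
      Nat.succ_eq_add_one, Nat.choose_zero_right, Nat.cast_one, one_mul]
  rw [h1, h2]
  ring

-- Newton's forward-difference formula: row[i] = Σ_{j ≤ i} C(i,j) * coeffs[j]
theorem newton (i : Nat) : ∀ (row : List Int), i < row.length →
    row.getD i 0 =
      ((List.range (i+1)).map
        (fun j => (i.choose j : Int) * (list_to_coeffs_alt row).getD j 0)).sum := by
  induction i with
  | zero =>
    intro row h
    match row, h with
    | x :: rest, _ => simp [alt_cons, List.range_one]
  | succ i ih =>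
    intro row h
    match row, h with
    | x :: rest, h =>
      have hrow : (x :: rest).getD (i+1) 0 =
          (x :: rest).getD i 0 + (pvDiff (x :: rest)).getD i 0 := by
        rw [pvDiff_getD _ _ h]; ring
      have hA := ih (x :: rest) (by simp at h ⊢; omega)
      have hlen : i < (pvDiff (x :: rest)).length := by
        rw [pvDiff_length]; simp at h ⊢; omega
      have hB := ih (pvDiff (x :: rest)) hlen
      have htail : ∀ j : Nat,
          (list_to_coeffs_alt (pvDiff (x :: rest))).getD j 0 =
          (list_to_coeffs_alt (x :: rest)).getD (j+1) 0 := by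
        intro j; rw [alt_cons]; rfl
      have hB' : (pvDiff (x :: rest)).getD i 0 =
          ((List.range (i+1)).map
            (fun j => (i.choose j : Int) * (list_to_coeffs_alt (x :: rest)).getD (j+1) 0)).sum := by
        rw [hB]; congr 1; exact List.map_congr_left (fun j _ => by rw [htail j])
      rw [hrow, hA, hB']
      exact (pascal_list i (fun j => (list_to_coeffs_alt (x :: rest)).getD j 0)).symm

-- generic: a subtracting fold is the start value minus the sum
theorem foldl_sub {α : Type} (l : List α) (f : α → Int) (a0 : Int) :
    l.foldl (fun a x => a - f x) a0 = a0 - (l.map f).sum := by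
  induction l generalizing a0 with
  | nil => simp
  | cons x t ih => simp only [List.foldl_cons, List.map_cons, List.sum_cons, ih]; ring

-- A's inner loop in closed form
theorem inner_eq (k : Nat) (co : List Int) (a0 : Int) :
    (PySem.List.pyRange 0 (k : Int) 1).foldl
      (fun a j => a - (Nat.choose k j.toNat : Int) * PySem.List.pyGetD co j 0) a0
    = a0 - ((List.range k).map (fun j => (k.choose j : Int) * co.getD j 0)).sum := by
  rw [PySem.List.pyRange_one, List.foldl_map, foldl_sub]
  congr 1
  refine congrArg _ (List.map_congr_left (fun j _ => ?_))
  simp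

-- A's outer step after simplifying the PySem indexing
def stepA (list : List Int) (co : List Int) (k : Nat) : List Int :=
  co.set k (list.getD k 0 -
    ((List.range k).map (fun j => (k.choose j : Int) * co.getD j 0)).sum)

theorem A_eq_rangeFold (list : List Int) :
    list_to_coeffs list =
      (List.range list.length).foldl (stepA list) (List.replicate list.length 0) := by
  unfold list_to_coeffs
  rw [PySem.List.enumerate_eq_map_pyRange (d := 0), List.foldl_map,
      PySem.List.pyRange_one, List.foldl_map]
  simp only [PySem.List.len_eq, sub_zero, Int.toNat_natCast, zero_add]
  congr 1
  funext co k
  simp only [inner_eq, PySem.List.pyGetD_natCast, PySem.List.pySetD_natCast, stepA]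

theorem loop_inv (list : List Int) (k : Nat) (hk : k ≤ list.length) :
    ((List.range k).foldl (stepA list) (List.replicate list.length 0)).length = list.length ∧
    ∀ j : Nat, j < k →
      ((List.range k).foldl (stepA list) (List.replicate list.length 0)).getD j 0 =
      (list_to_coeffs_alt list).getD j 0 := by
  induction k with
  | zero => simp
  | succ k ih =>
    obtain ⟨hlen, hval⟩ := ih (by omega)
    rw [List.range_succ, List.foldl_append, List.foldl_cons, List.foldl_nil]
    have hklt : k < list.length := by omega
    refine ⟨by simp only [stepA, List.length_set]; exact hlen, ?_⟩
    intro j hj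
    rcases Nat.lt_succ_iff_lt_or_eq.mp hj with hcase | hcase
    · have hne : k ≠ j := by omega
      have hset : ∀ v : Int,
          (((List.range k).foldl (stepA list) (List.replicate list.length 0)).set k v).getD j 0 =
          ((List.range k).foldl (stepA list) (List.replicate list.length 0)).getD j 0 := by
        intro v
        unfold List.getD
        rw [List.getElem?_set_ne hne]
      rw [stepA, hset]
      exact hval j hcase
    · subst hcase
      have hkF : j < ((List.range j).foldl (stepA list) (List.replicate list.length 0)).length := by
        omega
      rw [stepA, List.getD_eq_getElem _ _ (by simpa [List.length_set] using hkF),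
          List.getElem_set_self]
      have hsum :
          ((List.range j).map (fun m => (j.choose m : Int) *
            ((List.range j).foldl (stepA list) (List.replicate list.length 0)).getD m 0)).sum =
          ((List.range j).map
            (fun m => (j.choose m : Int) * (list_to_coeffs_alt list).getD m 0)).sum := by
        congr 1
        exact List.map_congr_left (fun m hm => by rw [hval m (List.mem_range.mp hm)])
      rw [hsum, newton j list hklt, List.range_succ]
      simp

-- ===== VERDICT (by name: the statement is the Claim_ definition above) =====
theorem list_to_coeffs_spec : Claim_equal_list_to_coeffs := by
  intro list _
  show list_to_coeffs list = list_to_coeffs_alt list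
  rw [A_eq_rangeFold]
  obtain ⟨hlen, hval⟩ := loop_inv list list.length (le_refl _)
  apply List.ext_getElem (by rw [hlen, alt_length])
  intro i h1 h2
  have := hval i (by omega)
  rwa [List.getD_eq_getElem _ _ h1, List.getD_eq_getElem _ _ (by rw [alt_length]; omega)] at this
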